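-- pv_equiv track=rewrite | github.com/rralcala/random-scripts | py/lc/1/171.py | titleToNumber
-- ===== SOURCE A (Python) =====
-- def titleToNumber(columnTitle: str) -> int:
--     characters = len(columnTitle)
--     start = ord("A") - 1
--     end = ord("Z") - start
--     val = 0
--     for i in range(characters):
--         pos = characters - i - 1
--         val += pow(end, pos) * (ord(columnTitle[i]) - start)
--     return val
-- ===== SOURCE B (Python) =====
-- def titleToNumber(columnTitle: str) -> int:
--     val = 0
--     for c in columnTitle:
--         val = val * 26 + (ord(c) - 64)
--     return val
-- ===== Notes on version B (the rewrite author's own statement) =====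
-- stated objective: faster
-- what changed: Replaces the positional sum with pow(26, pos) per character by a single Horner pass val = val*26 + digit, eliminating all exponentiations and indexing.
import Mathlib
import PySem

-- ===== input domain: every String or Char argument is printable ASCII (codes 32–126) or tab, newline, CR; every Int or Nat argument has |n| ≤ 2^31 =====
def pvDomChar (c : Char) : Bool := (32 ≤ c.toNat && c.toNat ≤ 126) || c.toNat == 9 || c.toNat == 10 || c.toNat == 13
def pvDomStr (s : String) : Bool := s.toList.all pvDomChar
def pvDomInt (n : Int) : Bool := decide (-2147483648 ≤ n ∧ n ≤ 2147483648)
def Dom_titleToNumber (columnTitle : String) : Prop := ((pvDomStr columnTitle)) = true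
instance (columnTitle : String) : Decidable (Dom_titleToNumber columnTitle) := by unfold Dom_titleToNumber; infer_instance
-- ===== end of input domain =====

-- B changes A's per-character pow(26, pos) positional sum into a single Horner pass (val = val*26 + digit): faster, no exponentiation.

-- ===== PORT A =====
-- Literal port of A: loop over range(characters), adding pow(end, pos) * (ord(columnTitle[i]) - start).
-- pow(end, pos) has pos = characters - i - 1 ≥ 0 on every loop iteration, so `^ pos.toNat` is exact;
-- columnTitle[i] is always in range, so pyGetD's default is never used.
def titleToNumber (columnTitle : String) : Int :=
  let l := columnTitle.toList
  let characters : Int := PySem.List.len l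
  let start : Int := 65 - 1          -- ord("A") - 1
  let endv : Int := 90 - start       -- ord("Z") - start
  (PySem.List.pyRange 0 characters 1).foldl
    (fun val i =>
      let pos := characters - i - 1
      val + endv ^ pos.toNat * (((PySem.List.pyGetD l i 'A').toNat : Int) - start))
    0

-- ===== PORT B =====
-- Horner's method: one left-to-right pass, val = val*26 + (ord(c) - 64).
def titleToNumber_alt (columnTitle : String) : Int :=
  columnTitle.toList.foldl (fun val c => val * 26 + ((c.toNat : Int) - 64)) 0

-- ===== PRECONDITION & SPEC =====
def Spec_titleToNumber (columnTitle : String) (out : Int) : Prop := out = titleToNumber_alt columnTitle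
instance (columnTitle : String) (out : Int) : Decidable (Spec_titleToNumber columnTitle out) := by unfold Spec_titleToNumber; infer_instance

-- ===== CLAIM (what is proved, stated in full; the proofs are below) =====
def Claim_equal_titleToNumber : Prop := ∀ (columnTitle : String), Dom_titleToNumber columnTitle → Spec_titleToNumber columnTitle (titleToNumber columnTitle)

-- ===== LEMMAS AND PROOFS =====

-- The positional sum A computes, written over Nat indices.
def pvSum (l : List Char) : Int :=
  ((List.range l.length).map
    (fun k => (26:Int) ^ (l.length - 1 - k) * (((l.getD k 'A').toNat : Int) - 64))).sum

lemma pvSum_append_singleton (xs : List Char) (c : Char) :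
    pvSum (xs ++ [c]) = 26 * pvSum xs + (((c.toNat : Int)) - 64) := by
  simp only [pvSum, List.length_append, List.length_singleton, List.range_succ,
    List.map_append, List.sum_append, List.map_cons, List.map_nil, List.sum_cons, List.sum_nil]
  have h1 : ((xs ++ [c]).getD xs.length 'A') = c := by
    simp [List.getD]
  have h2 : ∀ k ∈ List.range xs.length,
      (26:Int) ^ (xs.length + 1 - 1 - k) * ((((xs ++ [c]).getD k 'A').toNat : Int) - 64)
      = 26 * ((26:Int) ^ (xs.length - 1 - k) * (((xs.getD k 'A').toNat : Int) - 64)) := by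
    intro k hk
    rw [List.mem_range] at hk
    have hget : ((xs ++ [c]).getD k 'A') = xs.getD k 'A' := by
      simp [List.getD, List.getElem?_append_left hk]
    have hexp : xs.length + 1 - 1 - k = (xs.length - 1 - k) + 1 := by omega
    rw [hget, hexp, pow_succ]
    ring
  rw [List.map_congr_left h2, h1]
  have h3 : xs.length + 1 - 1 - xs.length = 0 := by omega
  rw [h3, pow_zero, one_mul]
  rw [← List.sum_map_mul_left]
  ring

lemma pvSum_eq_alt (l : List Char) :
    pvSum l = l.foldl (fun val c => val * 26 + ((c.toNat : Int) - 64)) 0 := by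
  induction l using List.reverseRecOn with
  | nil => simp [pvSum]
  | append_singleton xs c ih =>
      rw [pvSum_append_singleton, List.foldl_append, ← ih]
      simp [mul_comm]

lemma titleToNumber_eq_pvSum (columnTitle : String) :
    titleToNumber columnTitle = pvSum columnTitle.toList := by
  unfold titleToNumber
  set l := columnTitle.toList with hl
  simp only [PySem.List.len_eq]
  norm_num
  rw [PySem.List.foldl_add]
  rw [PySem.List.pyRange_one]
  simp only [sub_zero, Int.toNat_natCast, List.map_map]
  unfold pvSum
  rw [zero_add]
  congr 1
  apply List.map_congr_left
  intro k _
  simp only [Function.comp, zero_add, PySem.List.pyGetD_natCast]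
  congr 2
  omega

-- ===== VERDICT (by name: the statement is the Claim_ definition above) =====
theorem titleToNumber_spec : Claim_equal_titleToNumber := by
  intro s _
  unfold Spec_titleToNumber titleToNumber_alt
  rw [titleToNumber_eq_pvSum, pvSum_eq_alt]
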